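-- pv_equiv track=rewrite | github.com/Ajay702/Lead-Intent-Scoring-Service-Backend- | app/utils/rule_layer.py | score_role
-- ===== SOURCE A (Python) =====
-- DECISION_MAKER_ROLES = {"ceo", "founder", "owner", "cto", "cfo", "coo", "chief"}
--
-- SENIOR_ROLES = {"vp", "vice president", "head", "director"}
--
-- INFLUENCER_ROLES = {"manager", "lead", "senior", "principal", "architect"}
--
-- def score_role(role: str) -> int:
--     r = (role or "").lower()
--     if any(k in r for k in DECISION_MAKER_ROLES):
--         return 20
--     if any(k in r for k in SENIOR_ROLES):
--         return 15
--     if any(k in r for k in INFLUENCER_ROLES):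
--         return 10
--     return 0
-- ===== SOURCE B (Python) =====
-- # Single left-to-right scan of the role string: at each position, check which
-- # keywords start there (naive multi-pattern matcher) and keep the best score.
-- KEYWORD_SCORES = {
--     "ceo": 20, "founder": 20, "owner": 20, "cto": 20, "cfo": 20, "coo": 20, "chief": 20,
--     "vp": 15, "vice president": 15, "head": 15, "director": 15,
--     "manager": 10, "lead": 10, "senior": 10, "principal": 10, "architect": 10,
-- }
--
-- def score_role(role: str) -> int:
--     r = (role or "").lower()
--     best = 0
--     for i in range(len(r)):
--         for kw, score in KEYWORD_SCORES.items():
--             if r.startswith(kw, i):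
--                 best = max(best, score)
--     return best
-- ===== Notes on version B (the rewrite author's own statement) =====
-- stated objective: alternative
-- what changed: Replaced A's keyword-major tiered chain of any(k in r) substring searches by a string-major naive multi-pattern scan: one left-to-right pass over the positions of the lowercased role, checking at each position which keywords start there and keeping the maximum score; equivalent because tier scores decrease with A's check priority.
import Mathlib
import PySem

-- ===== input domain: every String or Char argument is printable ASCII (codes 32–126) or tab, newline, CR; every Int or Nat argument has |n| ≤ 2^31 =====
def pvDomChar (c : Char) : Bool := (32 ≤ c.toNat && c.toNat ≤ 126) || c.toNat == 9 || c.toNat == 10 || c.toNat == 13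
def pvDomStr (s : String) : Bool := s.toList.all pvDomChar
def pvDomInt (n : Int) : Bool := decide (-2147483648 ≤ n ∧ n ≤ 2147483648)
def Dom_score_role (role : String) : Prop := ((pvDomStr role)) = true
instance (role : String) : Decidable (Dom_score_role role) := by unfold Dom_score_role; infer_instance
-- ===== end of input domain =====

-- B replaces A's keyword-major tiered chain of 'any(k in r)' substring searches by a
-- string-major naive multi-pattern scan: one pass over the positions of the lowercased
-- role, checking which keywords start at each position and keeping the maximum score
-- (objective: alternative).


-- ===== PORT A =====
-- the three module-level keyword sets; only boolean membership ('any') is taken,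
-- so a list in the written order is a faithful port of the Python set
def decisionMakerRoles : List String := ["ceo", "founder", "owner", "cto", "cfo", "coo", "chief"]
def seniorRoles : List String := ["vp", "vice president", "head", "director"]
def influencerRoles : List String := ["manager", "lead", "senior", "principal", "architect"]

-- (role or "").lower(): 'role or ""' is role itself when non-empty and "" otherwise,
-- and lower "" = "", so r = lower role in both cases; exact via PySem.Str.lower/isIn
def score_role (role : String) : Int :=
  let r := PySem.Str.lower role
  if decisionMakerRoles.any (fun k => PySem.Str.isIn k r) then 20
  else if seniorRoles.any (fun k => PySem.Str.isIn k r) then 15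
  else if influencerRoles.any (fun k => PySem.Str.isIn k r) then 10
  else 0

-- ===== PORT B =====
-- the KEYWORD_SCORES dict of Source B as an association list in insertion order
-- (.items() iterates in exactly this order)
def keywordScores : List (String × Int) :=
  [("ceo", 20), ("founder", 20), ("owner", 20), ("cto", 20), ("cfo", 20), ("coo", 20),
   ("chief", 20), ("vp", 15), ("vice president", 15), ("head", 15), ("director", 15),
   ("manager", 10), ("lead", 10), ("senior", 10), ("principal", 10), ("architect", 10)]

-- Source B's loop: for i in range(len(r)): for kw, score in KEYWORD_SCORES.items():
--   if r.startswith(kw, i): best = max(best, score)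
-- PySem has no offset form of startswith; for 0 ≤ i, Python's r.startswith(kw, i)
-- is exactly 'kw is a prefix of r from position i', ported as startswith on drop i
def score_role_alt (role : String) : Int :=
  let r := PySem.Str.lower role
  (List.range (PySem.Str.len r).toNat).foldl
    (fun (best : Int) (i : ℕ) =>
      keywordScores.foldl
        (fun best p =>
          if PySem.Chars.startswith (r.toList.drop i) p.1.toList then
            max best p.2
          else best)
        best)
    0

-- ===== PRECONDITION & SPEC =====
def Spec_score_role (role : String) (out : Int) : Prop := out = score_role_alt role
instance (role : String) (out : Int) : Decidable (Spec_score_role role out) := by unfold Spec_score_role; infer_instance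

-- ===== CLAIM (what is proved, stated in full; the proofs are below) =====
def Claim_equal_score_role : Prop := ∀ (role : String), Dom_score_role role → Spec_score_role role (score_role role)

-- ===== LEMMAS AND PROOFS =====

-- the accumulator of a 'best = max(best, score)' fold never decreases
theorem le_fmax {α : Type} (c : α → Bool) (v : α → Int) (l : List α) (b : Int) :
    b ≤ l.foldl (fun b x => if c x then max b (v x) else b) b := by
  induction l generalizing b with
  | nil => exact le_refl b
  | cons x l ih =>
    simp only [List.foldl_cons]
    refine le_trans ?_ (ih _)
    split_ifs <;> omega

-- the initial accumulator can be pulled out of a max-accumulating fold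
theorem fmax_init {α : Type} (c : α → Bool) (v : α → Int) (l : List α) (b : Int)
    (hb : 0 ≤ b) :
    l.foldl (fun b x => if c x then max b (v x) else b) b
      = max b (l.foldl (fun b x => if c x then max b (v x) else b) 0) := by
  induction l generalizing b with
  | nil => simp only [List.foldl_nil]; omega
  | cons x l ih =>
    simp only [List.foldl_cons]
    have hF : (0:Int) ≤ l.foldl (fun b x => if c x then max b (v x) else b) 0 :=
      le_fmax c v l 0
    by_cases h : c x = true
    · rw [if_pos h, if_pos h, ih (max b (v x)) (by omega), ih (max 0 (v x)) (by omega)]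
      omega
    · rw [if_neg h, if_neg h, ih b hb]

-- an 'or' of two tests equals the max of the two separate folds (from 0)
theorem fmax_or {α : Type} (c₁ c₂ : α → Bool) (v : α → Int) (l : List α) :
    l.foldl (fun b x => if c₁ x || c₂ x then max b (v x) else b) 0
      = max (l.foldl (fun b x => if c₁ x then max b (v x) else b) 0)
            (l.foldl (fun b x => if c₂ x then max b (v x) else b) 0) := by
  induction l with
  | nil => simp
  | cons x l ih =>
    simp only [List.foldl_cons]
    have h1 : (0:Int) ≤ l.foldl (fun b x => if c₁ x then max b (v x) else b) 0 :=
      le_fmax c₁ v l 0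
    have h2 : (0:Int) ≤ l.foldl (fun b x => if c₂ x then max b (v x) else b) 0 :=
      le_fmax c₂ v l 0
    by_cases hx1 : c₁ x = true
    all_goals by_cases hx2 : c₂ x = true
    · rw [if_pos (by simp [hx1]), if_pos hx1, if_pos hx2,
          fmax_init (fun x => c₁ x || c₂ x) v l _ (by omega),
          fmax_init c₁ v l _ (by omega), fmax_init c₂ v l _ (by omega), ih]
      omega
    · rw [if_pos (by simp [hx1]), if_pos hx1, if_neg hx2,
          fmax_init (fun x => c₁ x || c₂ x) v l _ (by omega),
          fmax_init c₁ v l _ (by omega), ih]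
      omega
    · rw [if_pos (by simp [hx1, hx2]), if_neg hx1, if_pos hx2,
          fmax_init (fun x => c₁ x || c₂ x) v l _ (by omega),
          fmax_init c₂ v l _ (by omega), ih]
      omega
    · rw [if_neg (by simp [hx1, hx2]), if_neg hx1, if_neg hx2, ih]

-- two consecutive passes with tests c₁ then c₂ equal one pass with 'c₁ or c₂'
theorem fmax_twopass {α : Type} (c₁ c₂ : α → Bool) (v : α → Int) (l : List α) (b : Int)
    (hb : 0 ≤ b) :
    l.foldl (fun b x => if c₂ x then max b (v x) else b)
      (l.foldl (fun b x => if c₁ x then max b (v x) else b) b)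
      = l.foldl (fun b x => if c₁ x || c₂ x then max b (v x) else b) b := by
  have h1 : (0:Int) ≤ l.foldl (fun b x => if c₁ x then max b (v x) else b) b :=
    le_trans hb (le_fmax c₁ v l b)
  rw [fmax_init c₂ v l _ h1, fmax_init c₁ v l b hb,
      fmax_init (fun x => c₁ x || c₂ x) v l b hb, fmax_or]
  omega

-- a fold whose test never fires is the identity
theorem fmax_false {α : Type} (c : α → Bool) (v : α → Int) (l : List α) (b : Int)
    (h : ∀ x ∈ l, c x = false) :
    l.foldl (fun b x => if c x then max b (v x) else b) b = b := by
  induction l generalizing b with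
  | nil => rfl
  | cons x l ih =>
    simp only [List.foldl_cons, h x List.mem_cons_self]
    exact ih _ (fun y hy => h y (List.mem_cons_of_mem x hy))

-- LOOP EXCHANGE: a position-major double fold (per position, max over the keywords
-- matching there) equals a keyword-major single fold with an 'any position' test
theorem fold_of_folds {α : Type} (xs : List ℕ) (q : ℕ → α → Bool) (v : α → Int)
    (l : List α) (b : Int) (hb : 0 ≤ b) :
    xs.foldl (fun best i =>
        l.foldl (fun b x => if q i x then max b (v x) else b) best) b
      = l.foldl (fun b x => if xs.any (fun i => q i x) then max b (v x) else b) b := by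
  induction xs generalizing b with
  | nil =>
    simp only [List.foldl_nil]
    exact (fmax_false _ v l b (by simp)).symm
  | cons i xs ih =>
    simp only [List.foldl_cons]
    rw [ih _ (le_trans hb (le_fmax (q i) v l b)), fmax_twopass (q i) _ v l b hb]
    apply PySem.List.foldl_congr_mem
    intro acc x _
    rw [List.any_cons]

-- a keyword matches somewhere iff it starts at some position i < len (keyword ≠ "")
theorem anyRange_startswith (cs sub : List Char) (hs : sub ≠ []) :
    (List.range cs.length).any (fun i => PySem.Chars.startswith (cs.drop i) sub)
      = PySem.Chars.isIn sub cs := by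
  cases hval : PySem.Chars.isIn sub cs with
  | true =>
    obtain ⟨j, hj⟩ := (PySem.Chars.exists_prefix_drop_iff_isIn sub cs).mpr hval
    have hlen : sub.length ≤ cs.length - j := by
      have := hj.length_le; simpa using this
    have hpos : 0 < sub.length := List.length_pos_iff.mpr hs
    rw [List.any_eq_true]
    exact ⟨j, List.mem_range.mpr (by omega), (PySem.Chars.startswith_iff _ _).mpr hj⟩
  | false =>
    rw [List.any_eq_false]
    intro i _ hstart
    have hpre : sub <+: cs.drop i := (PySem.Chars.startswith_iff _ _).mp hstart
    have : PySem.Chars.isIn sub cs = true :=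
      (PySem.Chars.exists_prefix_drop_iff_isIn sub cs).mp ⟨i, hpre⟩
    rw [hval] at this; exact absurd this (by simp)

-- one constant-score tier of the flat fold collapses to 'if any keyword matches'
theorem fold_tier (c : String → Bool) (ks : List String) (s m : Int) :
    (ks.map (fun k => (k, s))).foldl
      (fun best p => if c p.1 then max best p.2 else best) m
    = if ks.any c then max m s else m := by
  induction ks generalizing m with
  | nil => simp
  | cons k ks ih =>
    simp only [List.map_cons, List.foldl_cons, List.any_cons]
    by_cases h : c k = true
    · rw [if_pos h, ih]
      simp only [h, Bool.true_or, if_true]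
      by_cases hr : ks.any c = true
      · rw [if_pos hr, max_assoc, max_self]
      · rw [if_neg hr]
    · rw [if_neg h, ih]
      simp only [Bool.eq_false_iff.mpr h, Bool.false_or]

-- ===== VERDICT (by name: the statement is the Claim_ definition above) =====
theorem score_role_spec : Claim_equal_score_role := by
  intro role _
  unfold Spec_score_role score_role score_role_alt
  set cs : List Char := (PySem.Str.lower role).toList with hcs
  have hlen : (PySem.Str.len (PySem.Str.lower role)).toNat = cs.length := by
    rw [PySem.Str.len_eq]; exact Int.toNat_natCast _
  simp only [hlen]
  -- exchange the loops: position-major scan = keyword-major fold with 'any position'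
  rw [fold_of_folds (List.range cs.length)
        (fun i p => PySem.Chars.startswith (cs.drop i) p.1.toList)
        (fun p : String × Int => p.2) keywordScores 0 (le_refl 0)]
  -- every keyword is non-empty, so 'starts at some i < len' is exactly 'is a substring'
  rw [PySem.List.foldl_congr_mem keywordScores _
        (fun b p => if PySem.Chars.isIn p.1.toList cs then max b p.2 else b) 0
        (fun acc p hp => by
          have hne : p.1.toList ≠ [] := by
            fin_cases hp <;> simp
          rw [anyRange_startswith cs p.1.toList hne])]
  -- split the flat table into its three constant-score tiers and collapse each
  have htable : keywordScores
      = (decisionMakerRoles.map (fun k => (k, (20 : Int))))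
        ++ (seniorRoles.map (fun k => (k, (15 : Int))))
        ++ (influencerRoles.map (fun k => (k, (10 : Int)))) := rfl
  rw [htable, List.foldl_append, List.foldl_append,
      fold_tier (fun k => PySem.Chars.isIn k.toList cs) decisionMakerRoles 20 0,
      fold_tier (fun k => PySem.Chars.isIn k.toList cs) seniorRoles 15 _,
      fold_tier (fun k => PySem.Chars.isIn k.toList cs) influencerRoles 10 _]
  simp only [PySem.Str.isIn_eq, ← hcs]
  cases h1 : decisionMakerRoles.any (fun k => PySem.Chars.isIn k.toList cs) <;>
  cases h2 : seniorRoles.any (fun k => PySem.Chars.isIn k.toList cs) <;>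
  cases h3 : influencerRoles.any (fun k => PySem.Chars.isIn k.toList cs) <;>
    simp_all
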